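-- pv_equiv track=rewrite | github.com/nealcox/Advent_2019 | 16b.py | pattern_val
-- ===== SOURCE A (Python) =====
-- def pattern_val(pos_output,length):
--     base_pattern = [0,1,0,-1]
--     base_len = len(base_pattern)
--     output = []
--     for i in range(length+2):
--         for j in range (pos_output+1):
--             output.append(base_pattern[i%base_len])
--     return output[1:length+1]
-- ===== SOURCE B (Python) =====
-- def pattern_val(pos_output, length):
--     # Closed form: element m of the sliced pattern is base_pattern[((m+1)//(pos_output+1)) % 4],
--     # computed directly instead of materialising the full repeated pattern and slicing it.
--     base_pattern = [0, 1, 0, -1]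
--     step = pos_output + 1
--     return [base_pattern[((m + 1) // step) % 4] for m in range(length)]
-- ===== Notes on version B (the rewrite author's own statement) =====
-- stated objective: faster
-- what changed: B computes each of the length output elements directly by the index formula base_pattern[((m+1)//(pos_output+1))%4] instead of building the full (length+2)*(pos_output+1)-element repeated pattern and slicing it.
-- outside the precondition, e.g. on pattern_val(-1, 3): A returns [], B raises ZeroDivisionError; on pattern_val(-2, 3): A returns [], B returns [-1, 0, 1]
import Mathlib
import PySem

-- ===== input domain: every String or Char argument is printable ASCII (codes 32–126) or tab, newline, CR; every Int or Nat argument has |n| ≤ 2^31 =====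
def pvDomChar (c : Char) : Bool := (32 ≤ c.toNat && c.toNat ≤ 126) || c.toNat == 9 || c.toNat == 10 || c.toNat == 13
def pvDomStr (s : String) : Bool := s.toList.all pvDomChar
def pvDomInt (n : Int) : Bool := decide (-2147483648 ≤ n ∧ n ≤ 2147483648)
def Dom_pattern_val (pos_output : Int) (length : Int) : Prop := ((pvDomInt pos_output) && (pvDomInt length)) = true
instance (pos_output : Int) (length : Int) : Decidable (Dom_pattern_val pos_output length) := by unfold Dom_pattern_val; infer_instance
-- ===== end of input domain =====

-- B replaces A's "build the whole repeated pattern, then slice" by the direct index formula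
-- base_pattern[((m+1)//(pos_output+1))%4] for each of the length output elements (objective: faster, asymptotic).

-- ===== PORT A =====
-- base_pattern[i % 4]: the index i % 4 is always in [0,4), so pyGetD with default 0 is exact.
def pattern_val (pos_output : Int) (length : Int) : List Int :=
  let base_pattern : List Int := [0, 1, 0, -1]
  let base_len : Int := 4
  let output : List Int :=
    (PySem.List.pyRange 0 (length + 2) 1).foldl (fun output i =>
      (PySem.List.pyRange 0 (pos_output + 1) 1).foldl (fun output _j =>
        output ++ [PySem.List.pyGetD base_pattern (PySem.Int.mod i base_len) 0]) output) []
  PySem.List.slice output (some 1) (some (length + 1))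

-- ===== PORT B =====
-- base_pattern[… % 4]: the index is always in [0,4) (step > 0 under Pre_), so pyGetD with default 0 is exact.
def pattern_val_alt (pos_output : Int) (length : Int) : List Int :=
  let base_pattern : List Int := [0, 1, 0, -1]
  let step : Int := pos_output + 1
  (PySem.List.pyRange 0 length 1).map (fun m =>
    PySem.List.pyGetD base_pattern (PySem.Int.mod (PySem.Int.floordiv (m + 1) step) 4) 0)

-- ===== PRECONDITION & SPEC =====
-- Pre_ excludes negative pos_output combined with positive length, on which A degenerately returns
-- [] (the inner loop runs zero times) while B's division by pos_output+1 raises (ZeroDivisionError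
-- at pos_output = -1) or yields other values: negative positions are outside the function's natural
-- domain (an FFT output position).
def Pre_pattern_val (pos_output : Int) (length : Int) : Prop := 0 ≤ pos_output ∨ length ≤ 0
instance (pos_output : Int) (length : Int) : Decidable (Pre_pattern_val pos_output length) := by unfold Pre_pattern_val; infer_instance
def pvWitness_pattern_val : Int × Int := (1, 5)

def Spec_pattern_val (pos_output : Int) (length : Int) (out : List Int) : Prop := out = pattern_val_alt pos_output length
instance (pos_output : Int) (length : Int) (out : List Int) : Decidable (Spec_pattern_val pos_output length out) := by unfold Spec_pattern_val; infer_instance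

-- ===== CLAIM (what is proved, stated in full; the proofs are below) =====
def Claim_equal_pattern_val : Prop := ∀ (pos_output : Int) (length : Int), Dom_pattern_val pos_output length → Pre_pattern_val pos_output length → Spec_pattern_val pos_output length (pattern_val pos_output length)

-- ===== LEMMAS AND PROOFS =====

-- the accumulator-append foldl is init ++ flatMap
theorem foldl_append_flatMap {α β : Type} (L : List α) (g : α → List β) (init : List β) :
    L.foldl (fun acc x => acc ++ g x) init = init ++ L.flatMap g := by
  induction L generalizing init with
  | nil => simp
  | cons x xs ih => simp [List.flatMap_cons, ih]

-- length of the repeated pattern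
theorem len_flatRep (N P : Nat) (g : Nat → Int) :
    ((List.range N).flatMap (fun i => List.replicate P (g i))).length = N * P := by
  induction N with
  | zero => simp
  | succ n ih => simp [List.range_succ, ih, Nat.succ_mul]

-- indexing the repeated pattern: element k is g (k / P)
theorem flatRep_getElem? (N P : Nat) (g : Nat → Int) (k : Nat) (hk : k < N * P) :
    ((List.range N).flatMap (fun i => List.replicate P (g i)))[k]? = some (g (k / P)) := by
  induction N with
  | zero => omega
  | succ n ih =>
    rw [List.range_succ, List.flatMap_append]
    by_cases h : k < n * P
    · rw [List.getElem?_append_left (by rw [len_flatRep]; exact h)]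
      exact ih h
    · rw [List.getElem?_append_right (by rw [len_flatRep]; omega)]
      simp only [List.flatMap_cons, List.flatMap_nil, List.append_nil, len_flatRep]
      have hdiv : k / P = n :=
        Nat.div_eq_of_lt_le (Nat.le_of_not_lt h) (by simpa [Nat.succ_mul] using hk)
      have hsm : (n+1)*P = n*P + P := Nat.succ_mul n P
      rw [List.getElem?_replicate, if_pos (by omega), hdiv]

theorem pattern_val_spec : Claim_equal_pattern_val := by
  intro pos_output length _ hpre
  unfold Pre_pattern_val at hpre
  unfold Spec_pattern_val pattern_val pattern_val_alt
  simp only []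
  set P : Nat := (pos_output + 1).toNat with hPdef
  set g : Nat → Int := fun r => ([0, 1, 0, -1] : List Int).getD (r % 4) 0 with hg
  -- inner loop: append the constant P times
  have hinner : ∀ (i : Int) (acc : List Int),
      (PySem.List.pyRange 0 (pos_output + 1) 1).foldl (fun output _j =>
        output ++ [PySem.List.pyGetD ([0,1,0,-1] : List Int) (PySem.Int.mod i 4) 0]) acc
      = acc ++ List.replicate P (PySem.List.pyGetD ([0,1,0,-1] : List Int) (PySem.Int.mod i 4) 0) := by
    intro i acc
    rw [PySem.List.foldl_append_singleton_eq_map]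
    congr 1
    rw [List.map_const', PySem.List.length_pyRange_one]
    congr 1
    omega
  rw [show (fun (output : List Int) (i : Int) =>
        (PySem.List.pyRange 0 (pos_output + 1) 1).foldl (fun output _j =>
          output ++ [PySem.List.pyGetD ([0,1,0,-1] : List Int) (PySem.Int.mod i 4) 0]) output)
      = fun output i => output ++ List.replicate P (PySem.List.pyGetD ([0,1,0,-1] : List Int) (PySem.Int.mod i 4) 0)
    from funext fun acc => funext fun i => hinner i acc]
  rw [foldl_append_flatMap, List.nil_append]
  by_cases hlen : length ≤ 0
  · -- both sides are empty
    rw [PySem.List.pyRange_one_eq_nil hlen, List.map_nil]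
    by_cases hlen2 : length + 2 ≤ 0
    · rw [PySem.List.pyRange_one_eq_nil hlen2]
      simp [PySem.List.slice]
    · rw [PySem.List.slice_toNat _ (by omega : (0:Int) ≤ 1) (by omega : (0:Int) ≤ length + 1)]
      rw [show (length + 1).toNat - (1:Int).toNat = 0 by omega, List.take_zero]
  · -- length > 0
    push_neg at hlen
    have hpre' : 0 ≤ pos_output := by rcases hpre with h | h; exact h; omega
    have hP : 0 < P := by omega
    have hPcast : (pos_output + 1) = (P : Int) := by omega
    set N : Nat := length.toNat with hNdef
    have hN : 0 < N := by omega
    -- the built list, over Nat indices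
    rw [show length + 2 = ((N + 2 : Nat) : Int) by omega, PySem.List.pyRange_zero_natCast,
        List.flatMap_map]
    have hbody : (fun (a : Nat) => List.replicate P (PySem.List.pyGetD ([0,1,0,-1] : List Int) (PySem.Int.mod ((a : Int)) 4) 0))
        = fun k => List.replicate P (g k) := by
      funext k
      congr 1
      rw [show PySem.Int.mod ((k : Int)) 4 = ((k % 4 : Nat) : Int) by exact_mod_cast PySem.Int.mod_natCast k 4,
        PySem.List.pyGetD_natCast]
    rw [hbody]
    -- slice with nonnegative bounds
    rw [PySem.List.slice_toNat _ (by omega : (0:Int) ≤ 1) (by omega : (0:Int) ≤ length + 1)]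
    rw [show (length + 1).toNat = N + 1 by omega, show ((1:Int)).toNat = 1 from rfl]
    -- B side over Nat indices
    rw [show length = ((N : Nat) : Int) by omega, PySem.List.pyRange_zero_natCast, List.map_map]
    have hBbody : (fun (a : Nat) => PySem.List.pyGetD ([0,1,0,-1] : List Int)
          (PySem.Int.mod (PySem.Int.floordiv ((a : Int) + 1) (pos_output + 1)) 4) 0)
        = fun k => g ((k + 1) / P) := by
      funext k
      rw [hPcast,
        show ((k : Int) + 1) = ((k + 1 : Nat) : Int) by push_cast; ring,
        show PySem.Int.floordiv ((k + 1 : Nat) : Int) ((P : Nat) : Int) = (((k+1) / P : Nat) : Int)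
          from PySem.Int.floordiv_natCast (k+1) P,
        show PySem.Int.mod ((((k+1)/P : Nat) : Int)) 4 = ((((k+1)/P) % 4 : Nat) : Int)
          by exact_mod_cast PySem.Int.mod_natCast ((k+1)/P) 4,
        PySem.List.pyGetD_natCast]
    simp only [Function.comp_def]
    rw [hBbody]
    -- final pure statement: element k of the slice is g ((k+1)/P)
    have hlenL : ((List.range (N + 2)).flatMap (fun i => List.replicate P (g i))).length = (N + 2) * P :=
      len_flatRep (N + 2) P g
    have hNP : N + 1 ≤ (N + 2) * P := by nlinarith
    apply List.ext_getElem
    · simp [hlenL]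
      omega
    · intro k hk1 hk2
      have hkN : k < N := by simpa using hk2
      have hk3 : 1 + k < (N + 2) * P := by omega
      rw [List.getElem_take, List.getElem_drop]
      have h2 := flatRep_getElem? (N + 2) P g (1 + k) hk3
      rw [List.getElem?_eq_getElem (by omega : 1 + k < _)] at h2
      rw [Option.some_inj.mp h2]
      rw [List.getElem_map, List.getElem_range]
      congr 2
      omega
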